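-- pv_equiv track=rewrite | github.com/ohaz/adventofcode2017 | day9/day9.py | handle_group
-- ===== SOURCE A (Python) =====
-- def handle_group(content, index, depth):
--     result = depth
--     garbage_mode = False
--     ignore_mode = False
--     child_consumed = 0
--     consumed = 0
--     garbage_consumed = 0
--     for i in range(index, len(content)):
--         char = content[i]
--         consumed += 1
--         if child_consumed > 0:
--             child_consumed -= 1
--             continue
--         if ignore_mode:
--             ignore_mode = False
--             continue
--         if char == '!':
--             ignore_mode = True
--             continue
--         if garbage_mode:
--             if char != '>':
--                 garbage_consumed += 1
--                 continue
--             garbage_mode = False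
--             continue
--         if char == '<':
--             garbage_mode = True
--             continue
--
--         if char == '{':
--             result_child = handle_group(content, i + 1, depth+1)
--             child_consumed += result_child[1]
--             result += result_child[0]
--             garbage_consumed += result_child[2]
--         if char == '}':
--             return result, consumed, garbage_consumed
--         if char == ',':
--             continue
--     return result, consumed, garbage_consumed
-- ===== SOURCE B (Python) =====
-- def handle_group(content, index, depth):
--     # Single non-recursive pass with an explicit depth counter measured
--     # against the base depth (A instead recurses on '{' and skips the
--     # child's characters via child_consumed).
--     n = len(content)
--     score = depth
--     d = depth
--     in_garbage = False
--     consumed = 0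
--     garbage = 0
--     i = index
--     while i < n:
--         c = content[i]
--         consumed += 1
--         if c == '!':
--             i += 2
--             if i <= n:
--                 consumed += 1
--             continue
--         if in_garbage:
--             if c == '>':
--                 in_garbage = False
--             else:
--                 garbage += 1
--         elif c == '<':
--             in_garbage = True
--         elif c == '{':
--             d += 1
--             score += d
--         elif c == '}':
--             if d == depth:
--                 return score, consumed, garbage
--             d -= 1
--         i += 1
--     return score, consumed, garbage
-- ===== Notes on version B (the rewrite author's own statement) =====
-- stated objective: alternative
-- what changed: Replaced A's recursion-per-group (where every ancestor loop walks child characters again via child_consumed) with a single non-recursive pass that keeps an explicit depth counter against the base depth.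
import Mathlib
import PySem

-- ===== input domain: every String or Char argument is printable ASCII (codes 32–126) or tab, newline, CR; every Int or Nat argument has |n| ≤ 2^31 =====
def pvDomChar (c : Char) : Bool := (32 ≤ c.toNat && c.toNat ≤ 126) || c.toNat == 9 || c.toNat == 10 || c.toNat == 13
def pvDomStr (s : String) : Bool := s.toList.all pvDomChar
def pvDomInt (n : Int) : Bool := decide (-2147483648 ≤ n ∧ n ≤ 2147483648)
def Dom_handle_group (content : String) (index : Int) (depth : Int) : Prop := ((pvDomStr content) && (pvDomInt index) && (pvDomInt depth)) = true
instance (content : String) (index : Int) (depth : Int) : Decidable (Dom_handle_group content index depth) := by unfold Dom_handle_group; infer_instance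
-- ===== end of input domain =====

-- B replaces A's recursion-plus-child_consumed re-scanning by one linear pass with a depth counter.

-- termination helper for both ports (cited by name in decreasing_by)
theorem pvTermStep {n i : Int} (k : Int) (h1 : i < n) (h2 : 1 ≤ k) : (n - (i + k)).toNat < (n - i).toNat := by omega

-- ===== PORT A =====
-- A's for-loop over range(index, len(content)) with its full state; the recursive call on '{'
-- is the same function started at i+1 with fresh accumulators, exactly as in the Python.
def pyLoopA (cs : List Char) (n i depth result : Int) (garbage ignore : Bool)
    (child consumed garbC : Int) : List Int :=
  if hi : i < n then
    match PySem.List.pyGet? cs i with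
    | none => []   -- Python raises IndexError here (excluded by Pre_)
    | some c =>
      if child > 0 then
        pyLoopA cs n (i+1) depth result garbage ignore (child - 1) (consumed + 1) garbC
      else if ignore then
        pyLoopA cs n (i+1) depth result garbage false child (consumed + 1) garbC
      else if c = '!' then
        pyLoopA cs n (i+1) depth result garbage true child (consumed + 1) garbC
      else if garbage then
        if c ≠ '>' then
          pyLoopA cs n (i+1) depth result garbage ignore child (consumed + 1) (garbC + 1)
        else
          pyLoopA cs n (i+1) depth result false ignore child (consumed + 1) garbC
      else if c = '<' then
        pyLoopA cs n (i+1) depth result true ignore child (consumed + 1) garbC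
      else if c = '{' then
        match pyLoopA cs n (i+1) (depth+1) (depth+1) false false 0 0 0 with
        | s :: k :: g :: _ =>
            pyLoopA cs n (i+1) depth (result + s) garbage ignore (child + k) (consumed + 1) (garbC + g)
        | _ => []   -- unreachable: the loop always yields a 3-tuple
      else if c = '}' then [result, consumed + 1, garbC]
      else
        pyLoopA cs n (i+1) depth result garbage ignore child (consumed + 1) garbC
  else [result, consumed, garbC]
termination_by (n - i).toNat
decreasing_by all_goals exact pvTermStep 1 hi (by norm_num)

def handle_group (content : String) (index : Int) (depth : Int) : List Int :=
  pyLoopA content.toList (PySem.Str.len content) index depth depth false false 0 0 0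

-- ===== PORT B =====
-- B's while-loop: one pass, explicit depth counter d against the base depth, '!' jumps two.
def pyLoopB (cs : List Char) (n i score d base : Int) (inG : Bool)
    (consumed garb : Int) : List Int :=
  if hi : i < n then
    match PySem.List.pyGet? cs i with
    | none => []   -- Python raises IndexError here (excluded by Pre_)
    | some c =>
      if c = '!' then
        pyLoopB cs n (i+2) score d base inG
          (if i + 2 ≤ n then consumed + 2 else consumed + 1) garb
      else if inG then
        if c = '>' then pyLoopB cs n (i+1) score d base false (consumed + 1) garb
        else pyLoopB cs n (i+1) score d base inG (consumed + 1) (garb + 1)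
      else if c = '<' then pyLoopB cs n (i+1) score d base true (consumed + 1) garb
      else if c = '{' then pyLoopB cs n (i+1) (score + (d + 1)) (d+1) base inG (consumed + 1) garb
      else if c = '}' then
        if d = base then [score, consumed + 1, garb]
        else pyLoopB cs n (i+1) score (d-1) base inG (consumed + 1) garb
      else pyLoopB cs n (i+1) score d base inG (consumed + 1) garb
  else [score, consumed, garb]
termination_by (n - i).toNat
decreasing_by all_goals first | exact pvTermStep 1 hi (by norm_num) | exact pvTermStep 2 hi (by norm_num)

def handle_group_alt (content : String) (index : Int) (depth : Int) : List Int :=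
  pyLoopB content.toList (PySem.Str.len content) index depth depth depth false 0 0

-- ===== PRECONDITION & SPEC =====
-- Pre_ excludes exactly index < -len(content), where the Python A (and B alike) raises IndexError.
def Pre_handle_group (content : String) (index : Int) (depth : Int) : Prop :=
  -(PySem.Str.len content) ≤ index
instance (content : String) (index : Int) (depth : Int) : Decidable (Pre_handle_group content index depth) := by unfold Pre_handle_group; infer_instance

def pvWitness_handle_group : String × Int × Int := ("{}", 0, 1)

def Spec_handle_group (content : String) (index : Int) (depth : Int) (out : List Int) : Prop := out = handle_group_alt content index depth
instance (content : String) (index : Int) (depth : Int) (out : List Int) : Decidable (Spec_handle_group content index depth out) := by unfold Spec_handle_group; infer_instance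

-- ===== CLAIM (what is proved, stated in full; the proofs are below) =====
def Claim_equal_handle_group : Prop := ∀ (content : String) (index : Int) (depth : Int), Dom_handle_group content index depth → Pre_handle_group content index depth → Spec_handle_group content index depth (handle_group content index depth)

-- ===== LEMMAS AND PROOFS =====

theorem pv_get_some (cs : List Char) (i : Int) (h1 : -(cs.length : Int) ≤ i)
    (h2 : i < (cs.length : Int)) : ∃ c, PySem.List.pyGet? cs i = some c := by
  rcases h : PySem.List.pyGet? cs i with _ | c
  · rw [PySem.List.pyGet?_eq_none_iff] at h
    exact absurd (by constructor <;> omega : PySem.Raise.InRange cs.length i) h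
  · exact ⟨c, rfl⟩

-- B's loop always returns a 3-list when no IndexError can occur.
theorem pv_shapeB (cs : List Char) : ∀ (m : Nat) (i score d base : Int) (inG : Bool)
    (consumed garb : Int), ((cs.length : Int) - i).toNat ≤ m → -(cs.length : Int) ≤ i →
    ∃ s k g, pyLoopB cs (cs.length : Int) i score d base inG consumed garb = [s, k, g] := by
  intro m
  induction m with
  | zero =>
    intro i score d base inG consumed garb hm hlo
    rw [pyLoopB]
    rw [dif_neg (by omega : ¬ i < (cs.length : Int))]
    exact ⟨_, _, _, rfl⟩
  | succ m ih =>
    intro i score d base inG consumed garb hm hlo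
    by_cases hi : i < (cs.length : Int)
    · obtain ⟨c, hc⟩ := pv_get_some cs i hlo hi
      rw [pyLoopB]
      rw [dif_pos hi, hc]; dsimp only
      split_ifs <;> first
        | exact ih _ _ _ _ _ _ _ (by omega) (by omega)
        | exact ⟨_, _, _, rfl⟩
    · rw [pyLoopB]
      rw [dif_neg hi]
      exact ⟨_, _, _, rfl⟩

-- Shape and bound of A's loop: it returns a 3-list whose consumed component grows by at
-- most one per remaining index.
theorem pv_bndA (cs : List Char) : ∀ (m : Nat) (i depth result : Int) (garbage ignore : Bool)
    (child consumed garbC : Int), ((cs.length : Int) - i).toNat ≤ m → -(cs.length : Int) ≤ i →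
    ∃ s k g, pyLoopA cs (cs.length : Int) i depth result garbage ignore child consumed garbC
        = [s, k, g] ∧ consumed ≤ k ∧ k ≤ consumed + max ((cs.length : Int) - i) 0 := by
  intro m
  induction m with
  | zero =>
    intro i depth result garbage ignore child consumed garbC hm hlo
    rw [pyLoopA]
    rw [dif_neg (by omega : ¬ i < (cs.length : Int))]
    exact ⟨_, _, _, rfl, le_rfl, by omega⟩
  | succ m ih =>
    intro i depth result garbage ignore child consumed garbC hm hlo
    by_cases hi : i < (cs.length : Int)
    · obtain ⟨c, hc⟩ := pv_get_some cs i hlo hi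
      rw [pyLoopA]
      rw [dif_pos hi, hc]; dsimp only
      split_ifs <;> first
        | (exact ⟨_, _, _, rfl, by omega, by omega⟩)
        | (obtain ⟨s, k, g, he, h1, h2⟩ := ih (i+1) _ _ _ _ _ _ _ (by omega) (by omega);
           exact ⟨s, k, g, he, by omega, by omega⟩)
        | (obtain ⟨s1, k1, g1, he1, h11, h12⟩ :=
             ih (i+1) (depth+1) (depth+1) false false 0 0 0 (by omega) (by omega);
           rw [he1]
           obtain ⟨s, k, g, he, h1, h2⟩ := ih (i+1) _ _ _ _ _ _ _ (by omega) (by omega)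
           exact ⟨s, k, g, he, by omega, by omega⟩)
    · rw [pyLoopA]
      rw [dif_neg hi]
      exact ⟨_, _, _, rfl, le_rfl, by omega⟩

-- Skipping child_consumed = k chars just advances the loop k positions and consumed by k.
theorem pv_skipA (cs : List Char) : ∀ (kn : Nat) (i depth result : Int) (garbage ignore : Bool)
    (consumed garbC : Int), -(cs.length : Int) ≤ i → i + kn ≤ (cs.length : Int) →
    pyLoopA cs (cs.length : Int) i depth result garbage ignore (kn : Int) consumed garbC
      = pyLoopA cs (cs.length : Int) (i + kn) depth result garbage ignore 0 (consumed + kn) garbC := by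
  intro kn
  induction kn with
  | zero =>
    intro i depth result garbage ignore consumed garbC hlo hhi
    norm_num
  | succ kn ih =>
    intro i depth result garbage ignore consumed garbC hlo hhi
    have hi : i < (cs.length : Int) := by
      have : (0:Int) < ((kn+1 : Nat) : Int) := by push_cast; omega
      omega
    obtain ⟨c, hc⟩ := pv_get_some cs i hlo hi
    rw [pyLoopA]
    rw [dif_pos hi, hc]; dsimp only
    rw [if_pos (by push_cast; omega : ((kn+1 : Nat) : Int) > 0)]
    have e1 : ((kn+1 : Nat) : Int) - 1 = (kn : Int) := by push_cast; ring
    rw [e1, ih (i+1) depth result garbage ignore (consumed+1) garbC (by omega) (by push_cast at hhi ⊢; omega)]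
    have e2 : i + 1 + (kn : Int) = i + ((kn+1 : Nat) : Int) := by push_cast; ring
    have e3 : consumed + 1 + (kn : Int) = consumed + ((kn+1 : Nat) : Int) := by push_cast; ring
    rw [e2, e3]

-- B's loop run with an outer base b is the run with inner base b' followed by the
-- continuation at the position after the closing '}' (accumulators are offsets).
theorem pv_compB (cs : List Char) : ∀ (m : Nat) (i Δs Δc Δg s' k' g' d b b' : Int) (inG : Bool),
    ((cs.length : Int) - i).toNat ≤ m → -(cs.length : Int) ≤ i → b < b' → b' ≤ d →
    pyLoopB cs (cs.length : Int) i (Δs + s') d b inG (Δc + k') (Δg + g')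
      = match pyLoopB cs (cs.length : Int) i s' d b' inG k' g' with
        | s :: k :: g :: _ =>
            pyLoopB cs (cs.length : Int) (i + (k - k')) (Δs + s) (b' - 1) b false (Δc + k) (Δg + g)
        | _ => [] := by
  intro m
  induction m with
  | zero =>
    intro i Δs Δc Δg s' k' g' d b b' inG hm hlo hb1 hb2
    have hi : ¬ i < (cs.length : Int) := by omega
    have hs' : pyLoopB cs (cs.length : Int) i s' d b' inG k' g' = [s', k', g'] := by
      rw [pyLoopB, dif_neg hi]
    rw [hs']; dsimp only
    rw [pyLoopB, dif_neg hi]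
    rw [show i + (k' - k') = i from by ring, pyLoopB, dif_neg hi]
  | succ m ih =>
    intro i Δs Δc Δg s' k' g' d b b' inG hm hlo hb1 hb2
    by_cases hi : i < (cs.length : Int)
    · obtain ⟨c, hc⟩ := pv_get_some cs i hlo hi
      by_cases hbang : c = '!'
      · -- '!' : both sides jump two positions
        by_cases h2 : i + 2 ≤ (cs.length : Int)
        · have hsc : pyLoopB cs (cs.length : Int) i s' d b' inG k' g'
              = pyLoopB cs (cs.length : Int) (i+2) s' d b' inG (k' + 2) g' := by
            rw [pyLoopB, dif_pos hi, hc]; dsimp only; rw [if_pos hbang, if_pos h2]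
          rw [pyLoopB, dif_pos hi, hc]; dsimp only
          rw [if_pos hbang, if_pos h2, hsc]
          rw [show Δc + k' + 2 = Δc + (k' + 2) from by ring]
          rw [ih (i+2) Δs Δc Δg s' (k'+2) g' d b b' inG (by omega) (by omega) hb1 hb2]
          obtain ⟨s, k, g, hs⟩ := pv_shapeB cs m (i+2) s' d b' inG (k'+2) g' (by omega) (by omega)
          rw [hs]; dsimp only
          rw [show i + 2 + (k - (k' + 2)) = i + (k - k') from by ring]
        · have hn1 : ¬ i + 2 < (cs.length : Int) := by omega
          have hn2 : ¬ i + 1 < (cs.length : Int) := by omega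
          have hsc : pyLoopB cs (cs.length : Int) i s' d b' inG k' g' = [s', k' + 1, g'] := by
            rw [pyLoopB, dif_pos hi, hc]; dsimp only
            rw [if_pos hbang, if_neg h2, pyLoopB, dif_neg hn1]
          rw [pyLoopB, dif_pos hi, hc]; dsimp only
          rw [if_pos hbang, if_neg h2, hsc]; dsimp only
          rw [pyLoopB, dif_neg hn1]
          rw [show i + (k' + 1 - k') = i + 1 from by ring, pyLoopB, dif_neg hn2]
          simp [add_assoc]
      · cases inG with
        | true =>
          by_cases hgt : c = '>'
          · have hsc : pyLoopB cs (cs.length : Int) i s' d b' true k' g'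
                = pyLoopB cs (cs.length : Int) (i+1) s' d b' false (k' + 1) g' := by
              rw [pyLoopB, dif_pos hi, hc]; dsimp only; rw [if_neg hbang, if_pos (show (true:Bool) = true from rfl), if_pos hgt]
            rw [pyLoopB, dif_pos hi, hc]; dsimp only
            rw [if_neg hbang, if_pos (show (true:Bool) = true from rfl), if_pos hgt, hsc]
            rw [show Δc + k' + 1 = Δc + (k' + 1) from by ring]
            rw [ih (i+1) Δs Δc Δg s' (k'+1) g' d b b' false (by omega) (by omega) hb1 hb2]
            obtain ⟨s, k, g, hs⟩ := pv_shapeB cs m (i+1) s' d b' false (k'+1) g' (by omega) (by omega)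
            rw [hs]; dsimp only
            rw [show i + 1 + (k - (k' + 1)) = i + (k - k') from by ring]
          · have hsc : pyLoopB cs (cs.length : Int) i s' d b' true k' g'
                = pyLoopB cs (cs.length : Int) (i+1) s' d b' true (k' + 1) (g' + 1) := by
              rw [pyLoopB, dif_pos hi, hc]; dsimp only; rw [if_neg hbang, if_pos (show (true:Bool) = true from rfl), if_neg hgt]
            rw [pyLoopB, dif_pos hi, hc]; dsimp only
            rw [if_neg hbang, if_pos (show (true:Bool) = true from rfl), if_neg hgt, hsc]
            rw [show Δc + k' + 1 = Δc + (k' + 1) from by ring,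
                show Δg + g' + 1 = Δg + (g' + 1) from by ring]
            rw [ih (i+1) Δs Δc Δg s' (k'+1) (g'+1) d b b' true (by omega) (by omega) hb1 hb2]
            obtain ⟨s, k, g, hs⟩ := pv_shapeB cs m (i+1) s' d b' true (k'+1) (g'+1) (by omega) (by omega)
            rw [hs]; dsimp only
            rw [show i + 1 + (k - (k' + 1)) = i + (k - k') from by ring]
        | false =>
          by_cases hlt : c = '<'
          · have hsc : pyLoopB cs (cs.length : Int) i s' d b' false k' g'
                = pyLoopB cs (cs.length : Int) (i+1) s' d b' true (k' + 1) g' := by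
              rw [pyLoopB, dif_pos hi, hc]; dsimp only
              rw [if_neg hbang, if_neg Bool.false_ne_true, if_pos hlt]
            rw [pyLoopB, dif_pos hi, hc]; dsimp only
            rw [if_neg hbang, if_neg Bool.false_ne_true, if_pos hlt, hsc]
            rw [show Δc + k' + 1 = Δc + (k' + 1) from by ring]
            rw [ih (i+1) Δs Δc Δg s' (k'+1) g' d b b' true (by omega) (by omega) hb1 hb2]
            obtain ⟨s, k, g, hs⟩ := pv_shapeB cs m (i+1) s' d b' true (k'+1) g' (by omega) (by omega)
            rw [hs]; dsimp only
            rw [show i + 1 + (k - (k' + 1)) = i + (k - k') from by ring]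
          · by_cases hob : c = '{'
            · have hsc : pyLoopB cs (cs.length : Int) i s' d b' false k' g'
                  = pyLoopB cs (cs.length : Int) (i+1) (s' + (d+1)) (d+1) b' false (k' + 1) g' := by
                rw [pyLoopB, dif_pos hi, hc]; dsimp only
                rw [if_neg hbang, if_neg Bool.false_ne_true, if_neg hlt, if_pos hob]
              rw [pyLoopB, dif_pos hi, hc]; dsimp only
              rw [if_neg hbang, if_neg Bool.false_ne_true, if_neg hlt, if_pos hob, hsc]
              rw [show Δc + k' + 1 = Δc + (k' + 1) from by ring,
                  show Δs + s' + (d + 1) = Δs + (s' + (d + 1)) from by ring]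
              rw [ih (i+1) Δs Δc Δg (s' + (d+1)) (k'+1) g' (d+1) b b' false (by omega) (by omega) hb1 (by omega)]
              obtain ⟨s, k, g, hs⟩ := pv_shapeB cs m (i+1) (s' + (d+1)) (d+1) b' false (k'+1) g' (by omega) (by omega)
              rw [hs]; dsimp only
              rw [show i + 1 + (k - (k' + 1)) = i + (k - k') from by ring]
            · by_cases hcb : c = '}'
              · by_cases hdb : d = b'
                · have hsc : pyLoopB cs (cs.length : Int) i s' d b' false k' g' = [s', k' + 1, g'] := by
                    rw [pyLoopB, dif_pos hi, hc]; dsimp only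
                    rw [if_neg hbang, if_neg Bool.false_ne_true, if_neg hlt, if_neg hob,
                        if_pos hcb, if_pos hdb]
                  rw [pyLoopB, dif_pos hi, hc]; dsimp only
                  rw [if_neg hbang, if_neg Bool.false_ne_true, if_neg hlt, if_neg hob,
                      if_pos hcb, if_neg (show ¬ d = b from by omega), hsc]
                  dsimp only
                  rw [show i + (k' + 1 - k') = i + 1 from by ring,
                      show Δc + k' + 1 = Δc + (k' + 1) from by ring, hdb]
                · have hsc : pyLoopB cs (cs.length : Int) i s' d b' false k' g'
                      = pyLoopB cs (cs.length : Int) (i+1) s' (d-1) b' false (k' + 1) g' := by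
                    rw [pyLoopB, dif_pos hi, hc]; dsimp only
                    rw [if_neg hbang, if_neg Bool.false_ne_true, if_neg hlt, if_neg hob,
                        if_pos hcb, if_neg hdb]
                  rw [pyLoopB, dif_pos hi, hc]; dsimp only
                  rw [if_neg hbang, if_neg Bool.false_ne_true, if_neg hlt, if_neg hob,
                      if_pos hcb, if_neg (show ¬ d = b from by omega), hsc]
                  rw [show Δc + k' + 1 = Δc + (k' + 1) from by ring]
                  rw [ih (i+1) Δs Δc Δg s' (k'+1) g' (d-1) b b' false (by omega) (by omega) hb1 (by omega)]
                  obtain ⟨s, k, g, hs⟩ := pv_shapeB cs m (i+1) s' (d-1) b' false (k'+1) g' (by omega) (by omega)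
                  rw [hs]; dsimp only
                  rw [show i + 1 + (k - (k' + 1)) = i + (k - k') from by ring]
              · have hsc : pyLoopB cs (cs.length : Int) i s' d b' false k' g'
                    = pyLoopB cs (cs.length : Int) (i+1) s' d b' false (k' + 1) g' := by
                  rw [pyLoopB, dif_pos hi, hc]; dsimp only
                  rw [if_neg hbang, if_neg Bool.false_ne_true, if_neg hlt, if_neg hob, if_neg hcb]
                rw [pyLoopB, dif_pos hi, hc]; dsimp only
                rw [if_neg hbang, if_neg Bool.false_ne_true, if_neg hlt, if_neg hob, if_neg hcb, hsc]
                rw [show Δc + k' + 1 = Δc + (k' + 1) from by ring]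
                rw [ih (i+1) Δs Δc Δg s' (k'+1) g' d b b' false (by omega) (by omega) hb1 hb2]
                obtain ⟨s, k, g, hs⟩ := pv_shapeB cs m (i+1) s' d b' false (k'+1) g' (by omega) (by omega)
                rw [hs]; dsimp only
                rw [show i + 1 + (k - (k' + 1)) = i + (k - k') from by ring]
    · have hs' : pyLoopB cs (cs.length : Int) i s' d b' inG k' g' = [s', k', g'] := by
        rw [pyLoopB, dif_neg hi]
      rw [hs']; dsimp only
      rw [pyLoopB, dif_neg hi]
      rw [show i + (k' - k') = i from by ring, pyLoopB, dif_neg hi]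

-- Main simulation: A's loop in normal mode (no pending skip, no pending ignore) equals
-- B's loop at base depth.
theorem pv_main (cs : List Char) : ∀ (m : Nat) (i d r cons gc : Int) (garbage : Bool),
    ((cs.length : Int) - i).toNat ≤ m → -(cs.length : Int) ≤ i →
    pyLoopA cs (cs.length : Int) i d r garbage false 0 cons gc
      = pyLoopB cs (cs.length : Int) i r d d garbage cons gc := by
  intro m
  induction m with
  | zero =>
    intro i d r cons gc garbage hm hlo
    have hi : ¬ i < (cs.length : Int) := by omega
    rw [pyLoopA, dif_neg hi, pyLoopB, dif_neg hi]
  | succ m ih =>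
    intro i d r cons gc garbage hm hlo
    by_cases hi : i < (cs.length : Int)
    · obtain ⟨c, hc⟩ := pv_get_some cs i hlo hi
      rw [pyLoopA, dif_pos hi, hc]; dsimp only
      rw [if_neg (show ¬ (0:Int) > 0 from by omega), if_neg Bool.false_ne_true]
      rw [pyLoopB, dif_pos hi, hc]; dsimp only
      by_cases hbang : c = '!'
      · -- '!' : A sets ignore_mode and clears it on the next char; B jumps two
        rw [if_pos hbang, if_pos hbang]
        by_cases hi1 : i + 1 < (cs.length : Int)
        · obtain ⟨c2, hc2⟩ := pv_get_some cs (i+1) (by omega) hi1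
          rw [pyLoopA, dif_pos hi1, hc2]; dsimp only
          rw [if_neg (show ¬ (0:Int) > 0 from by omega),
              if_pos (show (true:Bool) = true from rfl)]
          rw [show i + 1 + 1 = i + 2 from by ring,
              ih (i+2) d r (cons+1+1) gc garbage (by omega) (by omega)]
          rw [if_pos (show i + 2 ≤ (cs.length : Int) from by omega)]
          rw [show cons + 1 + 1 = cons + 2 from by ring]
        · rw [pyLoopA, dif_neg hi1]
          rw [if_neg (show ¬ i + 2 ≤ (cs.length : Int) from by omega)]
          rw [pyLoopB, dif_neg (show ¬ i + 2 < (cs.length : Int) from by omega)]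
      · rw [if_neg hbang, if_neg hbang]
        cases garbage with
        | true =>
          rw [if_pos (show (true:Bool) = true from rfl), if_pos (show (true:Bool) = true from rfl)]
          by_cases hgt : c = '>'
          · rw [if_neg (not_not_intro hgt), if_pos hgt]
            exact ih (i+1) d r (cons+1) gc false (by omega) (by omega)
          · rw [if_pos hgt, if_neg hgt]
            exact ih (i+1) d r (cons+1) (gc+1) true (by omega) (by omega)
        | false =>
          rw [if_neg Bool.false_ne_true, if_neg Bool.false_ne_true]
          by_cases hlt : c = '<'
          · rw [if_pos hlt, if_pos hlt]
            exact ih (i+1) d r (cons+1) gc true (by omega) (by omega)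
          · rw [if_neg hlt, if_neg hlt]
            by_cases hob : c = '{'
            · -- '{' : A recurses and then skips the child's consumed chars;
              -- B keeps scanning with the incremented depth counter
              rw [if_pos hob, if_pos hob]
              obtain ⟨s, k, g, hch, hk0, hk1⟩ :=
                pv_bndA cs m (i+1) (d+1) (d+1) false false 0 0 0 (by omega) (by omega)
              rw [hch]; dsimp only
              rw [show (0:Int) + k = k from by ring]
              have hkn : ((k.toNat : Nat) : Int) = k := Int.toNat_of_nonneg (by omega)
              have hsk := pv_skipA cs k.toNat (i+1) d (r+s) false false (cons+1) (gc+g)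
                (by omega) (by omega)
              rw [hkn] at hsk
              rw [hsk, ih (i+1+k) d (r+s) (cons+1+k) (gc+g) false (by omega) (by omega)]
              have hcomp := pv_compB cs m (i+1) r (cons+1) gc (d+1) 0 0 (d+1) d (d+1) false
                (by omega) (by omega) (by omega) (le_refl _)
              rw [show cons + 1 + (0:Int) = cons + 1 from by ring,
                  show gc + (0:Int) = gc from by ring] at hcomp
              rw [hcomp]
              have hchB : pyLoopB cs (cs.length : Int) (i+1) (d+1) (d+1) (d+1) false 0 0
                  = [s, k, g] := by
                rw [← ih (i+1) (d+1) (d+1) 0 0 false (by omega) (by omega), hch]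
              rw [hchB]; dsimp only
              rw [show i + 1 + (k - 0) = i + 1 + k from by ring,
                  show d + 1 - 1 = d from by ring]
            · rw [if_neg hob, if_neg hob]
              by_cases hcb : c = '}'
              · rw [if_pos hcb, if_pos hcb, if_pos rfl]
              · rw [if_neg hcb, if_neg hcb]
                exact ih (i+1) d r (cons+1) gc false (by omega) (by omega)
    · rw [pyLoopA, dif_neg hi, pyLoopB, dif_neg hi]

-- ===== VERDICT (by name: the statement is the Claim_ definition above) =====
theorem handle_group_spec : Claim_equal_handle_group := by
  intro content index depth _ hpre
  unfold Spec_handle_group handle_group handle_group_alt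
  have hlen : PySem.Str.len content = (content.toList.length : Int) := by
    simp [PySem.Str.len_eq]
  unfold Pre_handle_group at hpre
  rw [hlen] at hpre ⊢
  exact pv_main content.toList ((content.toList.length : Int) - index).toNat index depth depth 0 0
    false le_rfl hpre
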